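-- pv_equiv track=rewrite | github.com/bansalsahab/Lawyer-UP-Bits-Hackathon- | Lease-Contract.py | _anonymize_content
-- ===== SOURCE A (Python) =====
-- def _anonymize_content(text: str) -> str:
--     """Remove personal information from content"""
--     replacements = {
--         "Parth Bansal": "[Tenant]",
--         "Sarath": "[Owner]",
--         "Aboard Valley": "[Property Address]"
--     }
--     for original, replacement in replacements.items():
--         text = text.replace(original, replacement)
--     return text
-- ===== SOURCE B (Python) =====
-- def _anonymize_content(text: str) -> str:
--     """Remove personal information from content"""
--     replacements = {
--         "Parth Bansal": "[Tenant]",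
--         "Sarath": "[Owner]",
--         "Aboard Valley": "[Property Address]"
--     }
--     out = []
--     i = 0
--     n = len(text)
--     while i < n:
--         for original, replacement in replacements.items():
--             if text.startswith(original, i):
--                 out.append(replacement)
--                 i += len(original)
--                 break
--         else:
--             out.append(text[i])
--             i += 1
--     return "".join(out)
-- ===== Notes on version B (the rewrite author's own statement) =====
-- stated objective: alternative
-- what changed: Replaces three sequential full-text str.replace passes with a single left-to-right scan that tries each key at the current position and emits either a replacement or one character (sound because no key overlaps another and no replacement value contains a key).
import Mathlib
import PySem

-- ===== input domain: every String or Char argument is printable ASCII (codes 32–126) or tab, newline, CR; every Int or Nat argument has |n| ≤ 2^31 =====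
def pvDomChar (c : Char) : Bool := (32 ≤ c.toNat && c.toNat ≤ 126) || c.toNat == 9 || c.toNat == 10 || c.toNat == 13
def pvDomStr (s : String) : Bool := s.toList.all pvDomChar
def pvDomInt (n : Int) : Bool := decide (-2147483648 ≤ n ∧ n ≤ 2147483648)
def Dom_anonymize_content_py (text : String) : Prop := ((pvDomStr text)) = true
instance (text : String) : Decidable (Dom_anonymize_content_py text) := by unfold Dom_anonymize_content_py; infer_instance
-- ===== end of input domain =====

-- B replaces A's three sequential full-text replace passes by a single left-to-right scan
-- that tries each key at the current position (alternative decomposition, same return value).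


-- ===== PORT A =====
-- literal transliteration: a dict literal, then `text = text.replace(original, replacement)` per item
def anonymize_content_py (text : String) : String :=
  let replacements : PySem.Dict String String :=
    PySem.Dict.ofList [("Parth Bansal", "[Tenant]"), ("Sarath", "[Owner]"), ("Aboard Valley", "[Property Address]")]
  replacements.items.foldl (fun t p => PySem.Str.replace t p.1 p.2) text

-- ===== PORT B =====
def pvK1 : List Char := "Parth Bansal".toList
def pvR1 : List Char := "[Tenant]".toList
def pvK2 : List Char := "Sarath".toList
def pvR2 : List Char := "[Owner]".toList
def pvK3 : List Char := "Aboard Valley".toList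
def pvR3 : List Char := "[Property Address]".toList

-- Source B's while-loop over the index i, as structural recursion on the remaining suffix;
-- text.startswith(key, i) = key.isPrefixOf (suffix); `t.drop 11` is the suffix after the
-- 12-char key (i += len(original) on the cons'ed list), similarly 5 and 12.
def pvAltGo : List Char → List Char
  | [] => []
  | c :: t =>
    if pvK1.isPrefixOf (c :: t) then pvR1 ++ pvAltGo (t.drop 11)
    else if pvK2.isPrefixOf (c :: t) then pvR2 ++ pvAltGo (t.drop 5)
    else if pvK3.isPrefixOf (c :: t) then pvR3 ++ pvAltGo (t.drop 12)
    else c :: pvAltGo t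
termination_by l => l.length
decreasing_by all_goals (simp; try omega)

def anonymize_content_py_alt (text : String) : String :=
  String.ofList (pvAltGo text.toList)

-- ===== PRECONDITION & SPEC =====
def Spec_anonymize_content_py (text : String) (out : String) : Prop := out = anonymize_content_py_alt text
instance (text : String) (out : String) : Decidable (Spec_anonymize_content_py text out) := by unfold Spec_anonymize_content_py; infer_instance

-- ===== CLAIM (what is proved, stated in full; the proofs are below) =====
def Claim_equal_anonymize_content_py : Prop := ∀ (text : String), Dom_anonymize_content_py text → Spec_anonymize_content_py text (anonymize_content_py text)

-- ===== LEMMAS AND PROOFS =====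

-- clean accumulator-free form of PySem.Chars.replace (for nonempty pattern)
def pvCrep (old new : List Char) : List Char → List Char
  | [] => []
  | c :: t =>
    if old.isPrefixOf (c :: t) then new ++ pvCrep old new (t.drop (old.length - 1))
    else c :: pvCrep old new t
termination_by l => l.length
decreasing_by all_goals (simp; try omega)

theorem pvGo_eq (fuel : Nat) : ∀ (old new l acc : List Char), old ≠ [] → l.length ≤ fuel →
    PySem.Chars.replace.go old new fuel l acc = acc.reverse ++ pvCrep old new l := by
  induction fuel with
  | zero =>
    intro old new l acc _ hl
    have : l = [] := List.eq_nil_of_length_eq_zero (Nat.le_zero.mp hl)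
    subst this
    rw [PySem.Chars.replace.go.eq_def]
    simp [pvCrep]
  | succ n ih =>
    intro old new l acc hold hl
    cases l with
    | nil => rw [PySem.Chars.replace.go.eq_def]; simp [pvCrep]
    | cons c t =>
      rw [PySem.Chars.replace.go.eq_def]
      simp only []
      rw [pvCrep]
      by_cases hpre : old.isPrefixOf (c :: t) = true
      · simp only [hpre, if_true]
        cases old with
        | nil => exact absurd rfl hold
        | cons o os =>
          have hdrop : List.drop (o :: os).length (c :: t) = t.drop ((o :: os).length - 1) := by
            simp
          rw [hdrop]
          rw [ih (o :: os) new (t.drop ((o :: os).length - 1)) (new.reverse ++ acc) hold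
              (by simp at hl ⊢; omega)]
          simp
      · simp only [hpre, if_false, Bool.false_eq_true]
        rw [ih old new t (c :: acc) hold (by simp at hl; omega)]
        simp

theorem pvReplace_eq (s old new : List Char) (hold : old ≠ []) :
    PySem.Chars.replace s old new = pvCrep old new s := by
  unfold PySem.Chars.replace
  have : old.isEmpty = false := by cases old <;> simp_all
  rw [this]
  simpa using pvGo_eq s.length old new s [] hold le_rfl

theorem pvCrep_cons_head_ne (o : Char) (os new : List Char) (c : Char) (t : List Char)
    (h : o ≠ c) : pvCrep (o :: os) new (c :: t) = c :: pvCrep (o :: os) new t := by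
  rw [pvCrep]
  have : (o :: os).isPrefixOf (c :: t) = false := by
    simp [List.isPrefixOf]
    intro hoc; exact absurd hoc h
  simp [this]

theorem pvCrep_comm_prefix (o : Char) (os new : List Char) (p : List Char)
    (hp : o ∉ p) : ∀ l, pvCrep (o :: os) new (p ++ l) = p ++ pvCrep (o :: os) new l := by
  induction p with
  | nil => intro l; simp
  | cons a p ih =>
    intro l
    have ha : o ≠ a := fun h => hp (h ▸ List.mem_cons_self)
    have hp' : o ∉ p := fun h => hp (List.mem_cons_of_mem _ h)
    rw [List.cons_append, pvCrep_cons_head_ne o os new a (p ++ l) ha, ih hp' l]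
    simp

theorem pvCrep_append_self (old new t : List Char) (hold : old ≠ []) :
    pvCrep old new (old ++ t) = new ++ pvCrep old new t := by
  cases old with
  | nil => exact absurd rfl hold
  | cons o os =>
    rw [List.cons_append, pvCrep]
    have hpre : (o :: os).isPrefixOf (o :: (os ++ t)) = true := by
      rw [List.isPrefixOf_iff_prefix]
      exact ⟨t, by simp⟩
    simp only [hpre, if_true]
    congr 2
    simp

theorem pvCrep_not_cons_prefix (old new : List Char) (c : Char) (t : List Char)
    (h : old.isPrefixOf (c :: t) = false) :
    pvCrep old new (c :: t) = c :: pvCrep old new t := by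
  rw [pvCrep]; simp [h]

-- if the replacement's first char never occurs in w, a prefix w of the output was a prefix of the input
theorem pvCrep_prefix_transfer (old : List Char) (r0 : Char) (rs : List Char) :
    ∀ l w, r0 ∉ w → w <+: pvCrep old (r0 :: rs) l → w <+: l := by
  intro l
  induction l using pvCrep.induct (old := old) with
  | case1 =>
    intro w hw h
    rw [pvCrep] at h
    simpa using h
  | case2 c t hpre _ =>
    intro w hw h
    rw [pvCrep, if_pos hpre, List.cons_append] at h
    cases w with
    | nil => exact List.nil_prefix
    | cons a w' =>
      rw [List.cons_prefix_cons] at h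
      exact absurd (h.1 ▸ List.mem_cons_self) hw
  | case3 c t hpre ih =>
    intro w hw h
    rw [pvCrep, if_neg hpre] at h
    cases w with
    | nil => exact List.nil_prefix
    | cons a w' =>
      rw [List.cons_prefix_cons] at h ⊢
      exact ⟨h.1, ih w' (fun hm => hw (List.mem_cons_of_mem _ hm)) h.2⟩

theorem pvMain (l : List Char) :
    pvCrep pvK3 pvR3 (pvCrep pvK2 pvR2 (pvCrep pvK1 pvR1 l)) = pvAltGo l := by
  induction l using pvAltGo.induct with
  | case1 => rw [pvAltGo]; simp [pvCrep]
  | case2 c t h1 ih =>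
    -- l = pvK1 ++ (t.drop 11)
    obtain ⟨rest, hrest⟩ := List.isPrefixOf_iff_prefix.mp h1
    have hdrop : List.drop 11 t = rest := by
      have := congrArg (List.drop 12) hrest
      simpa [pvK1] using this.symm
    rw [pvAltGo, if_pos h1, ← hrest]
    rw [pvCrep_append_self pvK1 pvR1 rest (by decide)]
    have e2 : pvCrep pvK2 pvR2 (pvR1 ++ pvCrep pvK1 pvR1 rest)
        = pvR1 ++ pvCrep pvK2 pvR2 (pvCrep pvK1 pvR1 rest) :=
      pvCrep_comm_prefix 'S' "arath".toList pvR2 pvR1 (by decide) _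
    rw [e2]
    have e3 : pvCrep pvK3 pvR3 (pvR1 ++ pvCrep pvK2 pvR2 (pvCrep pvK1 pvR1 rest))
        = pvR1 ++ pvCrep pvK3 pvR3 (pvCrep pvK2 pvR2 (pvCrep pvK1 pvR1 rest)) :=
      pvCrep_comm_prefix 'A' "board Valley".toList pvR3 pvR1 (by decide) _
    rw [e3, hdrop]
    rw [hdrop] at ih
    rw [ih]
  | case3 c t h1 h2 ih =>
    obtain ⟨rest, hrest⟩ := List.isPrefixOf_iff_prefix.mp h2
    have hdrop : List.drop 5 t = rest := by
      have := congrArg (List.drop 6) hrest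
      simpa [pvK2] using this.symm
    rw [pvAltGo, if_neg (by simp [h1]), if_pos h2, ← hrest]
    have e1 : pvCrep pvK1 pvR1 (pvK2 ++ rest) = pvK2 ++ pvCrep pvK1 pvR1 rest :=
      pvCrep_comm_prefix 'P' "arth Bansal".toList pvR1 pvK2 (by decide) _
    rw [e1]
    rw [pvCrep_append_self pvK2 pvR2 (pvCrep pvK1 pvR1 rest) (by decide)]
    have e3 : pvCrep pvK3 pvR3 (pvR2 ++ pvCrep pvK2 pvR2 (pvCrep pvK1 pvR1 rest))
        = pvR2 ++ pvCrep pvK3 pvR3 (pvCrep pvK2 pvR2 (pvCrep pvK1 pvR1 rest)) :=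
      pvCrep_comm_prefix 'A' "board Valley".toList pvR3 pvR2 (by decide) _
    rw [e3, hdrop]
    rw [hdrop] at ih
    rw [ih]
  | case4 c t h1 h2 h3 ih =>
    obtain ⟨rest, hrest⟩ := List.isPrefixOf_iff_prefix.mp h3
    have hdrop : List.drop 12 t = rest := by
      have := congrArg (List.drop 13) hrest
      simpa [pvK3] using this.symm
    rw [pvAltGo, if_neg (by simp [h1]), if_neg (by simp [h2]), if_pos h3, ← hrest]
    have e1 : pvCrep pvK1 pvR1 (pvK3 ++ rest) = pvK3 ++ pvCrep pvK1 pvR1 rest :=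
      pvCrep_comm_prefix 'P' "arth Bansal".toList pvR1 pvK3 (by decide) _
    rw [e1]
    have e2 : pvCrep pvK2 pvR2 (pvK3 ++ pvCrep pvK1 pvR1 rest)
        = pvK3 ++ pvCrep pvK2 pvR2 (pvCrep pvK1 pvR1 rest) :=
      pvCrep_comm_prefix 'S' "arath".toList pvR2 pvK3 (by decide) _
    rw [e2]
    rw [pvCrep_append_self pvK3 pvR3 _ (by decide)]
    rw [hdrop]
    rw [hdrop] at ih
    rw [ih]
  | case5 c t h1 h2 h3 ih =>
    rw [pvAltGo, if_neg (by simp [h1]), if_neg (by simp [h2]), if_neg (by simp [h3])]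
    have e1 : pvCrep pvK1 pvR1 (c :: t) = c :: pvCrep pvK1 pvR1 t :=
      pvCrep_not_cons_prefix pvK1 pvR1 c t (eq_false_of_ne_true h1)
    have h2' : pvK2.isPrefixOf (c :: pvCrep pvK1 pvR1 t) = false := by
      by_contra hc
      have hpre : pvK2 <+: pvCrep pvK1 pvR1 (c :: t) := by
        rw [e1]
        exact List.isPrefixOf_iff_prefix.mp (by simpa using hc)
      have : pvK2 <+: (c :: t) :=
        pvCrep_prefix_transfer pvK1 '[' "Tenant]".toList _ pvK2 (by decide) hpre
      rw [← List.isPrefixOf_iff_prefix] at this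
      simp [this] at h2
    have e2 : pvCrep pvK2 pvR2 (c :: pvCrep pvK1 pvR1 t)
        = c :: pvCrep pvK2 pvR2 (pvCrep pvK1 pvR1 t) :=
      pvCrep_not_cons_prefix pvK2 pvR2 c _ h2'
    have h3' : pvK3.isPrefixOf (c :: pvCrep pvK2 pvR2 (pvCrep pvK1 pvR1 t)) = false := by
      by_contra hc
      have hpre : pvK3 <+: pvCrep pvK2 pvR2 (pvCrep pvK1 pvR1 (c :: t)) := by
        rw [e1, e2]
        exact List.isPrefixOf_iff_prefix.mp (by simpa using hc)
      have s1 : pvK3 <+: pvCrep pvK1 pvR1 (c :: t) :=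
        pvCrep_prefix_transfer pvK2 '[' "Owner]".toList _ pvK3 (by decide) hpre
      have s2 : pvK3 <+: (c :: t) :=
        pvCrep_prefix_transfer pvK1 '[' "Tenant]".toList _ pvK3 (by decide) s1
      rw [← List.isPrefixOf_iff_prefix] at s2
      simp [s2] at h3
    have e3 : pvCrep pvK3 pvR3 (c :: pvCrep pvK2 pvR2 (pvCrep pvK1 pvR1 t))
        = c :: pvCrep pvK3 pvR3 (pvCrep pvK2 pvR2 (pvCrep pvK1 pvR1 t)) :=
      pvCrep_not_cons_prefix pvK3 pvR3 c _ h3'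
    rw [e1, e2, e3, ih]

set_option maxHeartbeats 1000000 in
theorem pvPortA_eq (text : String) :
    anonymize_content_py text =
      String.ofList (pvCrep pvK3 pvR3 (pvCrep pvK2 pvR2 (pvCrep pvK1 pvR1 text.toList))) := by
  have hitems : (PySem.Dict.ofList
      [("Parth Bansal", "[Tenant]"), ("Sarath", "[Owner]"), ("Aboard Valley", "[Property Address]")]
      : PySem.Dict String String).items
      = [("Parth Bansal", "[Tenant]"), ("Sarath", "[Owner]"), ("Aboard Valley", "[Property Address]")] := rfl
  have hfold : anonymize_content_py text
      = PySem.Str.replace (PySem.Str.replace (PySem.Str.replace text "Parth Bansal" "[Tenant]")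
          "Sarath" "[Owner]") "Aboard Valley" "[Property Address]" := by
    simp only [anonymize_content_py, hitems, List.foldl]
  rw [hfold]
  unfold PySem.Str.replace
  simp only [pvK1, pvK2, pvK3, pvR1, pvR2, pvR3]
  refine congrArg String.ofList ?_
  rw [pvReplace_eq _ _ _ (by decide)]
  refine congrArg (pvCrep _ _) ?_
  try simp only [String.toList_ofList]
  rw [pvReplace_eq _ _ _ (by decide)]
  refine congrArg (pvCrep _ _) ?_
  try simp only [String.toList_ofList]
  rw [pvReplace_eq _ _ _ (by decide)]

-- ===== VERDICT (by name: the statement is the Claim_ definition above) =====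
theorem anonymize_content_py_spec : Claim_equal_anonymize_content_py := by
  intro text _
  unfold Spec_anonymize_content_py anonymize_content_py_alt
  rw [pvPortA_eq, pvMain]
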